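-- pv_equiv track=rewrite | github.com/MarkCBell/bigger | bigger/utilities.py | lookahead
-- ===== SOURCE A (Python) =====
-- from collections import deque
-- from typing import Iterable, TypeVar
--
-- T = TypeVar("T")
--
-- def lookahead(iterable: Iterable[T], n: int) -> Iterable[tuple[T, T]]:
--     """Yield items of iterable together with the item n steps in the future."""
--
--     iterable = iter(iterable)
--     queue: deque[T] = deque()
--     try:
--         queue.extend(next(iterable) for _ in range(n))
--     except StopIteration:
--         return
--
--     for item in iterable:
--         queue.append(item)
--         yield queue.popleft(), queue[-1]
-- ===== SOURCE B (Python) =====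
-- from itertools import tee, islice
--
-- def lookahead(iterable, n):
--     """Yield items of iterable together with the item n steps in the future."""
--     a, b = tee(iter(iterable))
--     yield from zip(a, islice(b, n, None))
-- ===== Notes on version B (the rewrite author's own statement) =====
-- stated objective: idiomatic
-- what changed: Replaces the hand-maintained sliding deque (append/popleft per item) with two tee'd offset iterators zipped together; B also returns naturally (empty or self-pairs) where A's deque bookkeeping raises.
-- outside the precondition, e.g. on lookahead([], -1): A returns [], B raises ValueError
-- crash fix: A raises RuntimeError (PEP 479 turns the genexp's StopIteration into RuntimeError, so the except clause never fires) whenever 0 < n and the iterable has fewer than n items, and IndexError (queue[-1] on the emptied deque) when n = 0 and the iterable is nonempty; B returns [] resp. the self-pairs (x, x) there. — e.g. on lookahead([1, 2], 0): A raises IndexError, B returns [(1, 1), (2, 2)]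
import Mathlib
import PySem

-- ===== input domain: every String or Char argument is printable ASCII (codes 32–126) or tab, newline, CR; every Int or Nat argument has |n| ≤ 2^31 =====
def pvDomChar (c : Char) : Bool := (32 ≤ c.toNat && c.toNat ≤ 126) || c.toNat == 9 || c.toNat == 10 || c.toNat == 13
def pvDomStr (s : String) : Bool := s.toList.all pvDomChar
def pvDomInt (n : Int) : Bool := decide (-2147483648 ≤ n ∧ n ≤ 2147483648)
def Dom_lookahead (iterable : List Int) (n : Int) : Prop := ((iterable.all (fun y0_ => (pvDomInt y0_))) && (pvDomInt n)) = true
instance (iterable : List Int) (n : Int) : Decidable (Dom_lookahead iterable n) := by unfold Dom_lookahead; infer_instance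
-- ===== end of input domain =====

-- B replaces A's hand-maintained sliding deque with two tee'd offset iterators zipped together (idiomatic itertools decomposition).

-- ===== PORT A =====
-- the generator loop: for item in iterable: queue.append(item); yield queue.popleft(), queue[-1]
-- (queue[-1] is read AFTER popleft; if the deque is then empty Python raises IndexError — modelled by the `none` branch, excluded by Pre_)
def lookaheadLoop (queue : List Int) (rest : List Int) : List (Int × Int) :=
  match rest with
  | [] => []
  | item :: rest' =>
    match queue ++ [item] with
    | [] => []
    | front :: q' =>
      match q'.getLast? with
      | none => []                      -- IndexError: queue[-1] on empty deque
      | some lastv => (front, lastv) :: lookaheadLoop q' rest'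
termination_by rest.length

def lookahead (iterable : List Int) (n : Int) : List (Int × Int) :=
  -- queue.extend(next(iterable) for _ in range(n)); fewer than n items makes the genexp raise (excluded by Pre_)
  if (iterable.length : Int) < n then []
  else lookaheadLoop (iterable.take n.toNat) (iterable.drop n.toNat)

-- ===== PORT B =====
-- a, b = tee(iter(iterable)); yield from zip(a, islice(b, n, None))
-- (islice(b, n, None) on the tee'd copy of a list is exactly List.drop n; islice raises ValueError
-- for n < 0, which Pre_ excludes, so Int.toNat never actually clamps inside Pre_)
def lookahead_alt (iterable : List Int) (n : Int) : List (Int × Int) :=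
  iterable.zip (iterable.drop n.toNat)

-- ===== PRECONDITION & SPEC =====
-- Pre_ excludes exactly the inputs where A raises: RuntimeError when 0 < n and there are
-- fewer than n items (PEP 479 converts the genexp's StopIteration, so the except never fires),
-- and IndexError (queue[-1] on the emptied deque) when n ≤ 0 and the iterable is nonempty.
-- Pre_ also excludes (iterable = [], n < 0), where A returns [] but B's islice(b, n, None)
-- itself raises ValueError on the negative index.
def Pre_lookahead (iterable : List Int) (n : Int) : Prop :=
  (1 ≤ n ∧ n ≤ (iterable.length : Int)) ∨ (iterable = [] ∧ n = 0)
instance (iterable : List Int) (n : Int) : Decidable (Pre_lookahead iterable n) := by unfold Pre_lookahead; infer_instance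

def pvWitness_lookahead : List Int × Int := ([1, 2, 3, 4], 2)

-- A raises (RuntimeError when 0 < n and the iterable is shorter than n; IndexError when n = 0 and
-- the iterable is nonempty) while B returns [] resp. the self-pairs (x, x).
def Raises_lookahead (iterable : List Int) (n : Int) : Prop :=
  (0 < n ∧ (iterable.length : Int) < n) ∨ (n = 0 ∧ iterable ≠ [])
instance (iterable : List Int) (n : Int) : Decidable (Raises_lookahead iterable n) := by unfold Raises_lookahead; infer_instance
def pvRaiseWitness_lookahead : List Int × Int := ([1, 2], 0)
def pvRaiseWitnessOut_lookahead : List (Int × Int) := [(1, 1), (2, 2)]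

def Spec_lookahead (iterable : List Int) (n : Int) (out : List (Int × Int)) : Prop := out = lookahead_alt iterable n
instance (iterable : List Int) (n : Int) (out : List (Int × Int)) : Decidable (Spec_lookahead iterable n out) := by unfold Spec_lookahead; infer_instance

-- ===== CLAIM (what is proved, stated in full; the proofs are below) =====
def Claim_equal_lookahead : Prop := ∀ (iterable : List Int) (n : Int), Dom_lookahead iterable n → Pre_lookahead iterable n → Spec_lookahead iterable n (lookahead iterable n)
def Claim_raises_lookahead : Prop := (∀ (iterable : List Int) (n : Int), Dom_lookahead iterable n → Raises_lookahead iterable n → ¬ Pre_lookahead iterable n) ∧ (Dom_lookahead (pvRaiseWitness_lookahead.1) (pvRaiseWitness_lookahead.2) ∧ Raises_lookahead (pvRaiseWitness_lookahead.1) (pvRaiseWitness_lookahead.2) ∧ lookahead_alt (pvRaiseWitness_lookahead.1) (pvRaiseWitness_lookahead.2) = pvRaiseWitnessOut_lookahead)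

-- ===== LEMMAS AND PROOFS =====

theorem lookaheadLoop_eq_zip (rest queue : List Int) (h : queue ≠ []) :
    lookaheadLoop queue rest = List.zip (queue ++ rest) rest := by
  induction rest generalizing queue with
  | nil => simp [lookaheadLoop]
  | cons item rest' ih =>
    obtain ⟨f, t, rfl⟩ := List.exists_cons_of_ne_nil h
    have hq : (f :: t) ++ [item] = f :: (t ++ [item]) := by simp
    have hlast : (t ++ [item]).getLast? = some item := by
      simp [List.getLast?_append]
    rw [lookaheadLoop, hq]
    simp only [hlast]
    rw [ih (t ++ [item]) (by simp)]
    simp [List.zip]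

-- ===== VERDICT (by name: the statement is the Claim_ definition above) =====
theorem lookahead_raises : Claim_raises_lookahead := by
  unfold Claim_raises_lookahead
  refine ⟨?_, by decide⟩
  intro xs n _ hr hp
  rcases hr with ⟨h1, h2⟩ | ⟨h1, h2⟩ <;> rcases hp with ⟨p1, p2⟩ | ⟨p1, p2⟩
  · omega
  · omega
  · omega
  · exact h2 p1

theorem lookahead_spec : Claim_equal_lookahead := by
  intro xs n hdom hpre
  -- the raising region is disjoint from Pre_ (lookahead_raises); on Pre_ both ports agree
  rcases (em (Raises_lookahead xs n)) with hr | _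
  · exact absurd hpre ((lookahead_raises).1 xs n hdom hr)
  rcases hpre with hpre
  unfold Spec_lookahead lookahead lookahead_alt
  rcases hpre with ⟨h1, h2⟩ | ⟨rfl, rfl⟩
  · rw [if_neg (by omega)]
    have hk1 : 1 ≤ n.toNat := by omega
    have hk2 : n.toNat ≤ xs.length := by omega
    have hne : xs.take n.toNat ≠ [] := by
      intro h
      have hl := congrArg List.length h
      rw [List.length_take] at hl
      simp only [List.length_nil, Nat.min_eq_left hk2] at hl
      omega
    rw [lookaheadLoop_eq_zip _ _ hne, List.take_append_drop]
  · rw [if_neg (by simp)]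
    simp [lookaheadLoop]
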